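-- pv_equiv track=rewrite | github.com/Tidiane971/ZeldaLike | coffre_gestion.py | dBox
-- ===== SOURCE A (Python) =====
-- def dBox(num, T):
--     coord = [0,0]
--     k=0
--     for i in range(len(T)):
--         for j in range(len(T[i])):
--             if T[i][j] == 5:
--                 k+=1
--                 if k == num:
--                     coord[0] = j
--                     coord[1] = i
--                     return coord
-- ===== SOURCE B (Python) =====
-- def dBox(num, T):
--     if num < 1:
--         return None
--     acc = 0
--     for i, row in enumerate(T):
--         c = row.count(5)
--         if num <= acc + c:
--             j = -1
--             for _ in range(num - acc):
--                 j = row.index(5, j + 1)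
--             return [j, i]
--         acc += c
--     return None
-- ===== Notes on version B (the rewrite author's own statement) =====
-- stated objective: alternative
-- what changed: Replaces A's single cell-by-cell scan with a global counter and early return by a two-stage algorithm: count the 5s of each row with row.count(5), walk the cumulative counts to locate the row holding the num-th 5, then find its column by repeated row.index(5, start) within that one row (count/index run at C speed, so fewer interpreted per-cell steps).
import Mathlib
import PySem

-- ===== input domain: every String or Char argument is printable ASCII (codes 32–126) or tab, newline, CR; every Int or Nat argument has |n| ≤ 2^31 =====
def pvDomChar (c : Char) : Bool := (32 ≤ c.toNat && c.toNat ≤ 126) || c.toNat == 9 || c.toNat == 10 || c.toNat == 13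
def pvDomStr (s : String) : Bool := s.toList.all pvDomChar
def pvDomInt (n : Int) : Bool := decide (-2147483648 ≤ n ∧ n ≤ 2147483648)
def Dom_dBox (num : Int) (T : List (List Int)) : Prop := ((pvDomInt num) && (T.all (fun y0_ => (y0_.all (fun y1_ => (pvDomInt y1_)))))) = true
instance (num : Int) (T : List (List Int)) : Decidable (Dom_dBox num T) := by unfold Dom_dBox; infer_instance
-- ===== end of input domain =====

-- B replaces A's single cell-by-cell counting scan by a two-stage algorithm: per-row
-- counts of 5s locate the row of the num-th 5, then repeated index(5, start) finds
-- its column within that one row; objective: alternative.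

-- ===== PORT A =====
-- inner loop over one row: counter k, early return of coord = [j, i]
def dBoxInnerA (num i : Int) : Int → List Int → Int → Int × Option (List Int)
  | _, [], k => (k, none)
  | j, v :: rest, k =>
    if v = 5 then
      if k + 1 = num then (k + 1, some [j, i])
      else dBoxInnerA num i (j + 1) rest (k + 1)
    else dBoxInnerA num i (j + 1) rest k

-- outer loop over the rows
def dBoxOuterA (num : Int) : Int → List (List Int) → Int → Option (List Int)
  | _, [], _ => none
  | i, row :: rest, k =>
    match dBoxInnerA num i 0 row k with
    | (_, some r) => some r
    | (k', none) => dBoxOuterA num (i + 1) rest k'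

def dBox (num : Int) (T : List (List Int)) : Option (List Int) :=
  dBoxOuterA num 0 T 0

-- ===== PORT B =====
-- row.index(5, s) with nonnegative start s (every call below has j + 1 ≥ 0):
-- Python searches row[s:] and reports an absolute index; exact for s ≥ 0.
def bIndexFrom (row : List Int) (s : Nat) : Option Int :=
  (PySem.List.index? (row.drop s) 5).map (fun k : Nat => (k : Int) + (s : Int))

-- the inner 'for _ in range(num - acc): j = row.index(5, j + 1)' loop;
-- none = Python's ValueError from index (unreachable under the guard, proved below)
def bFind (row : List Int) : Nat → Int → Option Int
  | 0, j => some j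
  | n + 1, j =>
    match bIndexFrom row (j + 1).toNat with
    | some j' => bFind row n j'
    | none => none

-- the outer 'for i, row in enumerate(T)' loop with the running count acc
def bOuter (num : Int) : Int → Int → List (List Int) → Option (List Int)
  | _, _, [] => none
  | acc, i, row :: rest =>
    let c : Int := (PySem.List.count row 5 : Nat)
    if num ≤ acc + c then
      match bFind row (num - acc).toNat (-1) with
      | some j => some [j, i]
      | none => none
    else bOuter num (acc + c) (i + 1) rest

def dBox_alt (num : Int) (T : List (List Int)) : Option (List Int) :=
  if num < 1 then none
  else bOuter num 0 0 T

-- ===== PRECONDITION & SPEC =====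
def Spec_dBox (num : Int) (T : List (List Int)) (out : Option (List Int)) : Prop := out = dBox_alt num T
instance (num : Int) (T : List (List Int)) (out : Option (List Int)) : Decidable (Spec_dBox num T out) := by unfold Spec_dBox; infer_instance

-- ===== CLAIM (what is proved, stated in full; the proofs are below) =====
def Claim_equal_dBox : Prop := ∀ (num : Int) (T : List (List Int)), Dom_dBox num T → Spec_dBox num T (dBox num T)

-- ===== LEMMAS AND PROOFS =====

-- positions (absolute column indices, base b) of the 5-cells of one row
def posB (b : Int) : List Int → List Int
  | [] => []
  | v :: rest => (if v = 5 then [b] else []) ++ posB (b + 1) rest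

-- coordinates of the 5-cells of one row / of the whole grid
def rowPos (i j : Int) (row : List Int) : List (List Int) :=
  (posB j row).map (fun c => [c, i])

def gridPos : Int → List (List Int) → List (List Int)
  | _, [] => []
  | i, row :: rest => rowPos i 0 row ++ gridPos (i + 1) rest

lemma rowPos_cons (i j : Int) (v : Int) (rest : List Int) :
    rowPos i j (v :: rest) = (if v = 5 then [[j, i]] else []) ++ rowPos i (j + 1) rest := by
  by_cases hv : v = 5 <;> simp [rowPos, posB, hv]

-- ===== A-side characterisation =====
lemma inner_eq (num i : Int) (row : List Int) : ∀ (j k : Int),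
    dBoxInnerA num i j row k =
      if 1 ≤ num - k ∧ num - k ≤ ((rowPos i j row).length : Int)
      then (num, (rowPos i j row)[(num - k - 1).toNat]?)
      else (k + ((rowPos i j row).length : Int), none) := by
  induction row with
  | nil => intro j k; simp [dBoxInnerA, rowPos, posB]; omega
  | cons v rest ih =>
    intro j k
    by_cases hv : v = 5
    · subst hv
      have hr : rowPos i j (5 :: rest) = [j, i] :: rowPos i (j + 1) rest := by
        simp [rowPos_cons]
      rw [hr]
      simp only [List.length_cons]
      rw [show dBoxInnerA num i j (5 :: rest) k =
          (if k + 1 = num then (k + 1, some [j, i])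
           else dBoxInnerA num i (j + 1) rest (k + 1)) from by simp [dBoxInnerA]]
      by_cases hk : k + 1 = num
      · rw [if_pos hk, if_pos (by push_cast; omega)]
        have h0 : (num - k - 1).toNat = 0 := by omega
        simp [h0, hk]
      · rw [if_neg hk, ih]
        by_cases hc : 1 ≤ num - (k + 1) ∧ num - (k + 1) ≤ ((rowPos i (j + 1) rest).length : Int)
        · rw [if_pos hc, if_pos (by push_cast at hc ⊢; omega)]
          have ht : (num - k - 1).toNat = (num - (k + 1) - 1).toNat + 1 := by omega
          rw [ht, List.getElem?_cons_succ]
        · rw [if_neg hc, if_neg (by push_cast at hc ⊢; omega)]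
          exact Prod.ext_iff.mpr ⟨by push_cast; omega, rfl⟩
    · rw [show rowPos i j (v :: rest) = rowPos i (j + 1) rest from by simp [rowPos_cons, hv]]
      rw [show dBoxInnerA num i j (v :: rest) k = dBoxInnerA num i (j + 1) rest k from by
        simp [dBoxInnerA, hv]]
      exact ih (j + 1) k

lemma outer_eq (num : Int) (T : List (List Int)) : ∀ (i k : Int),
    dBoxOuterA num i T k =
      if 1 ≤ num - k ∧ num - k ≤ ((gridPos i T).length : Int)
      then (gridPos i T)[(num - k - 1).toNat]?
      else none := by
  induction T with
  | nil => intro i k; simp [dBoxOuterA, gridPos]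
  | cons row rest ih =>
    intro i k
    simp only [gridPos, List.length_append]
    rw [show dBoxOuterA num i (row :: rest) k =
        (match dBoxInnerA num i 0 row k with
         | (_, some r) => some r
         | (k', none) => dBoxOuterA num (i + 1) rest k') from rfl]
    rw [inner_eq]
    by_cases hc : 1 ≤ num - k ∧ num - k ≤ ((rowPos i 0 row).length : Int)
    · rw [if_pos hc]
      have hlt : (num - k - 1).toNat < (rowPos i 0 row).length := by omega
      rw [List.getElem?_eq_getElem hlt]
      show some _ = _
      rw [if_pos (by push_cast; omega)]
      rw [List.getElem?_append_left hlt, List.getElem?_eq_getElem hlt]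
    · rw [if_neg hc]
      show dBoxOuterA num (i + 1) rest (k + ((rowPos i 0 row).length : Int)) = _
      rw [ih]
      by_cases hc2 : 1 ≤ num - (k + ((rowPos i 0 row).length : Int)) ∧
          num - (k + ((rowPos i 0 row).length : Int)) ≤ ((gridPos (i + 1) rest).length : Int)
      · rw [if_pos hc2, if_pos (by push_cast at hc2 ⊢; omega)]
        rw [List.getElem?_append_right (by omega)]
        congr 1
        omega
      · rw [if_neg hc2, if_neg (by push_cast at hc2 ⊢; omega)]

-- ===== B-side lemmas =====
lemma mem_posB {b : Int} {row : List Int} {p : Int} (hp : p ∈ posB b row) : b ≤ p := by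
  induction row generalizing b with
  | nil => simp [posB] at hp
  | cons v rest ih =>
    simp only [posB, List.mem_append] at hp
    rcases hp with h | h
    · split at h <;> simp at h; omega
    · have := ih h; omega

lemma posB_pairwise (row : List Int) : ∀ b : Int, (posB b row).Pairwise (· < ·) := by
  induction row with
  | nil => intro b; simp [posB]
  | cons v rest ih =>
    intro b
    by_cases hv : v = 5
    · simp only [posB, hv]
      exact List.pairwise_cons.mpr ⟨fun p hp => by have := mem_posB hp; omega, ih (b + 1)⟩
    · simp [posB, hv, ih (b + 1)]

lemma count_eq_posB_length (row : List Int) : ∀ b : Int,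
    (PySem.List.count row 5 : Int) = ((posB b row).length : Int) := by
  induction row with
  | nil => intro b; simp [PySem.List.count, posB]
  | cons v rest ih =>
    intro b
    by_cases hv : v = 5 <;>
      simp [PySem.List.count, posB, hv] at *
    · have := ih (b + 1); push_cast at this ⊢; omega
    · exact ih (b + 1)

-- index? shifted by a drop = head of the tail of positions
lemma index?_map_eq_head (row : List Int) : ∀ b : Int,
    (PySem.List.index? row 5).map (fun k : Nat => (k : Int) + b) = (posB b row).head? := by
  induction row with
  | nil => intro b; simp [PySem.List.index?, posB]
  | cons v rest ih =>
    intro b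
    by_cases hv : v = 5
    · subst hv
      rw [PySem.List.index?_cons_self]
      simp [posB]
    · rw [PySem.List.index?_cons_of_ne rest hv, Option.map_map]
      simp only [posB, if_neg hv, List.nil_append]
      rw [show ((fun k : Nat => (k : Int) + b) ∘ (fun x : Nat => x + 1)) =
          (fun k : Nat => (k : Int) + (b + 1)) from funext fun k => by
        simp [Function.comp]; push_cast; ring]
      exact ih (b + 1)

lemma idxFrom_eq : ∀ (s : Nat) (row : List Int) (b : Int),
    (PySem.List.index? (row.drop s) 5).map (fun k : Nat => (k : Int) + (b + s)) =
      ((posB b row).filter (fun p => decide (b + s ≤ p))).head? := by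
  intro s
  induction s with
  | zero =>
    intro row b
    have hf : (posB b row).filter (fun p => decide (b + ((0 : Nat) : Int) ≤ p)) = posB b row := by
      apply List.filter_eq_self.mpr
      intro p hp
      have := mem_posB hp
      simp only [decide_eq_true_eq, Nat.cast_zero, add_zero]
      omega
    rw [hf, List.drop_zero]
    rw [show (fun k : Nat => (k : Int) + (b + ((0 : Nat) : Int))) =
        (fun k : Nat => (k : Int) + b) from funext fun k => by push_cast; ring]
    exact index?_map_eq_head row b
  | succ s ih =>
    intro row b
    cases row with
    | nil => simp [posB, PySem.List.index?]
    | cons v rest =>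
      have hdrop : (v :: rest).drop (s + 1) = rest.drop s := rfl
      rw [hdrop]
      have hfilt : (posB b (v :: rest)).filter (fun p => decide (b + ((s + 1 : Nat) : Int) ≤ p)) =
          (posB (b + 1) rest).filter (fun p => decide ((b + 1) + ((s : Nat) : Int) ≤ p)) := by
        by_cases hv : v = 5
        · rw [show posB b (v :: rest) = b :: posB (b + 1) rest from by simp [posB, hv]]
          rw [List.filter_cons, if_neg (by simp only [decide_eq_true_eq]; push_cast; omega)]
          apply List.filter_congr
          intro p _
          rw [decide_eq_decide]
          constructor <;> (intro; push_cast at *; omega)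
        · rw [show posB b (v :: rest) = posB (b + 1) rest from by simp [posB, hv]]
          apply List.filter_congr
          intro p _
          rw [decide_eq_decide]
          constructor <;> (intro; push_cast at *; omega)
      rw [hfilt, ← ih rest (b + 1)]
      congr 1
      funext k
      push_cast
      ring

-- for a strictly increasing list, filtering above the m-th element drops m+1 elements
lemma filter_gt_eq_drop : ∀ (P : List Int), P.Pairwise (· < ·) → ∀ (m : Nat) (hm : m < P.length),
    P.filter (fun p => decide (P[m] + 1 ≤ p)) = P.drop (m + 1) := by
  intro P
  induction P with
  | nil => intro _ m hm; simp at hm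
  | cons x rest ih =>
    intro hP m hm
    have hx := (List.pairwise_cons.mp hP).1
    have hrest := (List.pairwise_cons.mp hP).2
    cases m with
    | zero =>
      simp only [List.getElem_cons_zero, List.filter_cons, List.drop_succ_cons, List.drop_zero]
      rw [if_neg (by simp)]
      apply List.filter_eq_self.mpr
      intro p hp
      have := hx p hp
      simp only [decide_eq_true_eq]
      omega
    | succ m =>
      simp only [List.getElem_cons_succ, List.filter_cons, List.drop_succ_cons]
      have hm' : m < rest.length := by simpa using hm
      have hmem : rest[m] ∈ rest := List.getElem_mem hm'
      rw [if_neg (by have := hx _ hmem; simp only [decide_eq_true_eq]; omega)]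
      exact ih hrest m hm'

-- the repeated-index loop hits exactly the (m+n)-th position
lemma bFind_eq (row : List Int) : ∀ (n m : Nat) (j : Int), 1 ≤ n → m + n ≤ (posB 0 row).length →
    -1 ≤ j → (posB 0 row).filter (fun p => decide (j + 1 ≤ p)) = (posB 0 row).drop m →
    bFind row n j = (posB 0 row)[m + n - 1]? := by
  intro n
  induction n with
  | zero => intro m j h1; omega
  | succ n ih =>
    intro m j _ hmn hj hfilt
    have hm : m < (posB 0 row).length := by omega
    have hs : (((j + 1).toNat : Nat) : Int) = j + 1 := by omega
    have hidx : bIndexFrom row (j + 1).toNat = some (posB 0 row)[m] := by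
      unfold bIndexFrom
      have h0 := idxFrom_eq (j + 1).toNat row 0
      simp only [zero_add, hs] at h0
      simp only [hs]
      rw [h0, hfilt, List.head?_drop, List.getElem?_eq_getElem hm]
    rw [show bFind row (n + 1) j =
        (match bIndexFrom row (j + 1).toNat with
         | some j' => bFind row n j'
         | none => none) from rfl, hidx]
    show bFind row n (posB 0 row)[m] = _
    cases n with
    | zero =>
      simp only [bFind]
      have hi : m + (0 + 1) - 1 = m := by omega
      rw [hi, List.getElem?_eq_getElem hm]
    | succ n =>
      have hj' : -1 ≤ (posB 0 row)[m] := by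
        have := mem_posB (List.getElem_mem hm); omega
      have hfilt' : (posB 0 row).filter (fun p => decide ((posB 0 row)[m] + 1 ≤ p)) =
          (posB 0 row).drop (m + 1) :=
        filter_gt_eq_drop (posB 0 row) (posB_pairwise row 0) m hm
      have hi : m + (n + 1 + 1) - 1 = (m + 1) + (n + 1) - 1 := by omega
      rw [hi]
      exact ih (m + 1) _ (by omega) (by omega) hj' hfilt'

-- B's outer loop agrees with the gridPos characterisation
lemma bOuter_eq (num : Int) : ∀ (rows : List (List Int)) (acc i : Int), acc < num →
    bOuter num acc i rows =
      if num - acc ≤ ((gridPos i rows).length : Int)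
      then (gridPos i rows)[(num - acc - 1).toNat]?
      else none := by
  intro rows
  induction rows with
  | nil =>
    intro acc i hacc
    simp [bOuter, gridPos]
  | cons row rest ih =>
    intro acc i hacc
    have hcount := count_eq_posB_length row 0
    have hlenrp : (rowPos i 0 row).length = (posB 0 row).length := by simp [rowPos]
    simp only [gridPos, List.length_append]
    rw [show bOuter num acc i (row :: rest) =
        (if num ≤ acc + ((PySem.List.count row 5 : Nat) : Int) then
          (match bFind row (num - acc).toNat (-1) with
           | some j => some [j, i]
           | none => none)
         else bOuter num (acc + ((PySem.List.count row 5 : Nat) : Int)) (i + 1) rest) from rfl]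
    by_cases hc : num ≤ acc + ((PySem.List.count row 5 : Nat) : Int)
    · rw [if_pos hc]
      have hn1 : 1 ≤ (num - acc).toNat := by omega
      have hnlen : (num - acc).toNat ≤ (posB 0 row).length := by omega
      have hfilt : (posB 0 row).filter (fun p => decide ((-1 : Int) + 1 ≤ p)) =
          (posB 0 row).drop 0 := by
        rw [List.drop_zero]
        apply List.filter_eq_self.mpr
        intro p hp
        have := mem_posB hp
        simp only [decide_eq_true_eq]
        omega
      have hbf := bFind_eq row (num - acc).toNat 0 (-1) hn1 (by omega) (by omega) hfilt
      simp only [Nat.zero_add] at hbf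
      rw [hbf]
      have hieq : (num - acc).toNat - 1 = (num - acc - 1).toNat := by omega
      rw [hieq]
      have hlt : (num - acc - 1).toNat < (posB 0 row).length := by omega
      rw [List.getElem?_eq_getElem hlt]
      show some _ = _
      rw [if_pos (by push_cast; omega)]
      have hlt2 : (num - acc - 1).toNat < (rowPos i 0 row).length := by omega
      rw [List.getElem?_append_left hlt2, List.getElem?_eq_getElem hlt2]
      simp only [rowPos, List.getElem_map]
    · rw [if_neg hc, ih (acc + ((PySem.List.count row 5 : Nat) : Int)) (i + 1) (by omega)]
      by_cases hc2 : num - (acc + ((PySem.List.count row 5 : Nat) : Int)) ≤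
          ((gridPos (i + 1) rest).length : Int)
      · rw [if_pos hc2, if_pos (by push_cast at hc2 ⊢; omega)]
        rw [List.getElem?_append_right (by omega)]
        congr 1
        omega
      · rw [if_neg hc2, if_neg (by push_cast at hc2 ⊢; omega)]

-- ===== VERDICT (by name: the statement is the Claim_ definition above) =====
theorem dBox_spec : Claim_equal_dBox := by
  intro num T _
  unfold Spec_dBox dBox dBox_alt
  rw [outer_eq]
  by_cases hnum : num < 1
  · rw [if_pos hnum, if_neg (by omega)]
  · rw [if_neg hnum, bOuter_eq num T 0 0 (by omega)]
    by_cases hc : num - 0 ≤ ((gridPos 0 T).length : Int)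
    · rw [if_pos hc, if_pos (by omega)]
    · rw [if_neg hc, if_neg (by omega)]
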